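-- pv_equiv track=rewrite | github.com/yeogirlyun/enhanced-poker-strategy-system | backend/enhanced_hand_evaluation.py | _has_open_ended_draw
-- ===== SOURCE A (Python) =====
-- def _has_open_ended_draw(ranks):
--     """Check for open-ended straight draw."""
--     for i in range(len(ranks) - 3):
--         consecutive = 0
--         for j in range(i, len(ranks)):
--             if j == i or ranks[j] == ranks[j-1] + 1:
--                 consecutive += 1
--             else:
--                 break
--
--         if consecutive >= 4:
--             # Check if we can complete on both ends
--             low_complete = ranks[i] - 1 >= 2
--             high_complete = ranks[i + consecutive - 1] + 1 <= 14
--             if low_complete or high_complete: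
--                 return True
--
--     return False
-- ===== SOURCE B (Python) =====
-- def _has_open_ended_draw(ranks):
--     """Single linear pass: maintain the length of the current consecutive run."""
--     run = 1
--     for k in range(1, len(ranks)):
--         run = run + 1 if ranks[k] == ranks[k - 1] + 1 else 1
--         if run >= 4:
--             return True
--     return False
-- ===== Notes on version B (the rewrite author's own statement) =====
-- stated objective: simpler
-- what changed: Replaced the nested start-index x inner-run scan (and its provably always-satisfiable completion check) by a single linear pass maintaining a run-length counter that returns True the moment it reaches 4.
import Mathlib
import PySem

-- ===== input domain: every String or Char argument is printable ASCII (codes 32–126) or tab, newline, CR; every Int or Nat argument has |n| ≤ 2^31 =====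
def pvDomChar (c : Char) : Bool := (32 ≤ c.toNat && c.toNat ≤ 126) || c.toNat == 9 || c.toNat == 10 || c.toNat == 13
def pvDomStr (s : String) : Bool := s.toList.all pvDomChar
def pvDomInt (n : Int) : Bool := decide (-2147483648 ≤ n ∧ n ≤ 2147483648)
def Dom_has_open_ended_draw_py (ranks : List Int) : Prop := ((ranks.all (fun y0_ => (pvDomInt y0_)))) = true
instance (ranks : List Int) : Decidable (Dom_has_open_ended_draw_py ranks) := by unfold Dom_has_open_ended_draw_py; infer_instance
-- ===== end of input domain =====

-- B replaces A's nested start-index × inner-run loops (and its provably vacuous completion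
-- check) by one linear scan with a run-length counter; objective: simpler.

-- ===== PORT A =====
-- Every index A reads is provably in range (j < len; ranks[j-1] is only read when j > i ≥ 0
-- by short-circuit of `or`), so `getD _ 0` is exact here.
def innerLoopA (ranks : List Int) (i : Nat) (j : Nat) (consecutive : Nat) : Nat :=
  if j < ranks.length then
    if j = i ∨ ranks.getD j 0 = ranks.getD (j - 1) 0 + 1 then
      innerLoopA ranks i (j + 1) (consecutive + 1)
    else consecutive
  else consecutive
termination_by ranks.length - j

def outerLoopA (ranks : List Int) (i : Nat) : Bool :=
  if i < ranks.length - 3 then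
    -- `consecutive` (computed once in Python) is written out inline here
    if 4 ≤ innerLoopA ranks i i 0 then
      if 2 ≤ ranks.getD i 0 - 1 ∨ ranks.getD (i + innerLoopA ranks i i 0 - 1) 0 + 1 ≤ 14 then true
      else outerLoopA ranks (i + 1)
    else outerLoopA ranks (i + 1)
  else false
termination_by ranks.length - 3 - i

def has_open_ended_draw_py (ranks : List Int) : Bool := outerLoopA ranks 0

-- ===== PORT B =====
def bLoop (tail : List Int) (prev : Int) (run : Nat) : Bool :=
  match tail with
  | [] => false
  | x :: xs =>
    let r := if x = prev + 1 then run + 1 else 1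
    if 4 ≤ r then true else bLoop xs x r

def has_open_ended_draw_py_alt (ranks : List Int) : Bool :=
  match ranks with
  | [] => false
  | x :: xs => bLoop xs x 1

-- ===== PRECONDITION & SPEC =====
def Spec_has_open_ended_draw_py (ranks : List Int) (out : Bool) : Prop := out = has_open_ended_draw_py_alt ranks
instance (ranks : List Int) (out : Bool) : Decidable (Spec_has_open_ended_draw_py ranks out) := by unfold Spec_has_open_ended_draw_py; infer_instance

-- ===== CLAIM (what is proved, stated in full; the proofs are below) =====
def Claim_equal_has_open_ended_draw_py : Prop := ∀ (ranks : List Int), Dom_has_open_ended_draw_py ranks → Spec_has_open_ended_draw_py ranks (has_open_ended_draw_py ranks)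

-- ===== LEMMAS AND PROOFS =====

-- four consecutive ranks starting at index j
def QuadAt (ranks : List Int) (j : Nat) : Prop :=
  j + 3 < ranks.length ∧
  ranks.getD (j + 1) 0 = ranks.getD j 0 + 1 ∧
  ranks.getD (j + 2) 0 = ranks.getD (j + 1) 0 + 1 ∧
  ranks.getD (j + 3) 0 = ranks.getD (j + 2) 0 + 1

def HasQuad (ranks : List Int) : Prop := ∃ j, QuadAt ranks j

-- accumulator is a lower bound for the inner loop's result
theorem innerA_ge_acc (ranks : List Int) (i : Nat) : ∀ j c, c ≤ innerLoopA ranks i j c := by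
  intro j
  induction hfu : ranks.length - j using Nat.strong_induction_on generalizing j with
  | _ fu ih =>
    intro c
    rw [innerLoopA]
    split
    · split
      · have := ih (ranks.length - (j+1)) (by omega) (j+1) rfl (c+1)
        omega
      · exact le_refl c
    · exact le_refl c

-- the inner loop's result is bounded by accumulator + remaining length
theorem innerA_le (ranks : List Int) (i : Nat) : ∀ j c, innerLoopA ranks i j c ≤ c + (ranks.length - j) := by
  intro j
  induction hfu : ranks.length - j using Nat.strong_induction_on generalizing j with
  | _ fu ih =>
    intro c
    rw [innerLoopA]
    split
    · split
      · have := ih (ranks.length - (j+1)) (by omega) (j+1) rfl (c+1)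
        omega
      · omega
    · omega

-- each counted step (beyond the first index i) satisfies the consecutive condition
theorem innerA_steps (ranks : List Int) (i : Nat) : ∀ j c p, j ≤ p →
    p < j + (innerLoopA ranks i j c - c) →
    p = i ∨ ranks.getD p 0 = ranks.getD (p - 1) 0 + 1 := by
  intro j
  induction hfu : ranks.length - j using Nat.strong_induction_on generalizing j with
  | _ fu ih =>
    intro c p hjp hp
    rw [innerLoopA] at hp
    split at hp
    · split at hp
      · rename_i hcond
        rcases Nat.eq_or_lt_of_le hjp with h | h
        · exact h ▸ hcond
        · exact ih (ranks.length - (j+1)) (by omega) (j+1) rfl (c+1) p h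
            (by have := innerA_ge_acc ranks i (j+1) (c+1); omega)
      · omega
    · omega

-- if the consecutive condition holds for m steps from j, the loop counts at least m more
theorem innerA_ge (ranks : List Int) (i : Nat) : ∀ m j c, j + m ≤ ranks.length →
    (∀ p, j ≤ p → p < j + m → p = i ∨ ranks.getD p 0 = ranks.getD (p - 1) 0 + 1) →
    c + m ≤ innerLoopA ranks i j c := by
  intro m
  induction m with
  | zero => intro j c _ _; simpa using innerA_ge_acc ranks i j c
  | succ m ihm =>
    intro j c hlen hcond
    rw [innerLoopA]
    rw [if_pos (by omega)]
    rw [if_pos (hcond j (le_refl j) (by omega))]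
    have := ihm (j+1) (c+1) (by omega) (fun p hp1 hp2 => hcond p (by omega) (by omega))
    omega

-- values along the counted run increase by exactly 1 per index
theorem innerA_chain (ranks : List Int) (i : Nat) :
    ∀ t, t < innerLoopA ranks i i 0 → ranks.getD (i + t) 0 = ranks.getD i 0 + t := by
  intro t
  induction t with
  | zero => intro _; simp
  | succ t iht =>
    intro ht
    have h1 : ranks.getD (i + (t+1)) 0 = ranks.getD (i + (t+1) - 1) 0 + 1 := by
      rcases innerA_steps ranks i i 0 (i + (t+1)) (by omega) (by omega) with h | h
      · omega
      · exact h
    have h2 : i + (t+1) - 1 = i + t := by omega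
    rw [h2] at h1
    rw [h1, iht (by omega)]
    push_cast; ring

theorem quad_innerA_ge4 (ranks : List Int) (j : Nat) (hq : QuadAt ranks j) :
    4 ≤ innerLoopA ranks j j 0 := by
  obtain ⟨hlen, h1, h2, h3⟩ := hq
  have := innerA_ge ranks j 4 j 0 (by omega) ?_
  · omega
  · intro p hp1 hp2
    have hp : p = j ∨ p = j + 1 ∨ p = j + 2 ∨ p = j + 3 := by omega
    rcases hp with h | h | h | h
    · exact Or.inl h
    · subst h; right; simpa using h1
    · subst h; right
      have e : j + 2 - 1 = j + 1 := by omega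
      rw [e]; exact h2
    · subst h; right
      have e : j + 3 - 1 = j + 2 := by omega
      rw [e]; exact h3

theorem innerA_quad (ranks : List Int) (i : Nat) (hi : i < ranks.length)
    (h4 : 4 ≤ innerLoopA ranks i i 0) : QuadAt ranks i := by
  have hle := innerA_le ranks i i 0
  have c1 := innerA_chain ranks i 1 (by omega)
  have c2 := innerA_chain ranks i 2 (by omega)
  have c3 := innerA_chain ranks i 3 (by omega)
  refine ⟨by omega, by omega, by omega, by omega⟩

-- outer loop characterization
theorem outerA_iff (ranks : List Int) : ∀ i0, outerLoopA ranks i0 = true ↔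
    ∃ i, i0 ≤ i ∧ i < ranks.length - 3 ∧ 4 ≤ innerLoopA ranks i i 0 ∧
      (2 ≤ ranks.getD i 0 - 1 ∨ ranks.getD (i + innerLoopA ranks i i 0 - 1) 0 + 1 ≤ 14) := by
  intro i0
  induction hfu : ranks.length - 3 - i0 using Nat.strong_induction_on generalizing i0 with
  | _ fu ih =>
    rw [outerLoopA]
    split
    · rename_i hlt
      have ihx := ih (ranks.length - 3 - (i0+1)) (by omega) (i0+1) rfl
      split
      · rename_i h4
        split
        · rename_i hchk
          simp only [true_iff]
          exact ⟨i0, le_refl _, hlt, h4, hchk⟩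
        · rename_i hchk
          rw [ihx]
          constructor
          · rintro ⟨i, h1, h2, h3, h5⟩; exact ⟨i, by omega, h2, h3, h5⟩
          · rintro ⟨i, h1, h2, h3, h5⟩
            refine ⟨i, ?_, h2, h3, h5⟩
            rcases Nat.eq_or_lt_of_le h1 with h | h
            · exact absurd (h ▸ h5) hchk
            · omega
      · rename_i h4
        rw [ihx]
        constructor
        · rintro ⟨i, h1, h2, h3, h5⟩; exact ⟨i, by omega, h2, h3, h5⟩
        · rintro ⟨i, h1, h2, h3, h5⟩
          refine ⟨i, ?_, h2, h3, h5⟩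
          rcases Nat.eq_or_lt_of_le h1 with h | h
          · exact absurd (h ▸ h3) h4
          · omega
    · rename_i hge
      constructor
      · intro h; exact absurd h (by simp)
      · rintro ⟨i, h1, h2, _, _⟩
        exfalso; omega

-- main direction: a quadruple anywhere implies the outer loop succeeds
theorem quad_to_outer (ranks : List Int) : ∀ j, QuadAt ranks j →
    ∃ i, 0 ≤ i ∧ i < ranks.length - 3 ∧ 4 ≤ innerLoopA ranks i i 0 ∧
      (2 ≤ ranks.getD i 0 - 1 ∨ ranks.getD (i + innerLoopA ranks i i 0 - 1) 0 + 1 ≤ 14) := by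
  intro j
  induction hfu : ranks.length - j using Nat.strong_induction_on generalizing j with
  | _ fu ih =>
    intro hq
    have hlen : j + 3 < ranks.length := hq.1
    have h4 := quad_innerA_ge4 ranks j hq
    by_cases hchk : 2 ≤ ranks.getD j 0 - 1 ∨ ranks.getD (j + innerLoopA ranks j j 0 - 1) 0 + 1 ≤ 14
    · exact ⟨j, Nat.zero_le _, by omega, h4, hchk⟩
    · rw [not_or] at hchk
      obtain ⟨hlow, hhigh⟩ := hchk
      set c := innerLoopA ranks j j 0 with hc
      have hle := innerA_le ranks j j 0
      have hend : ranks.getD (j + c - 1) 0 = ranks.getD j 0 + (c - 1 : Nat) := by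
        have := innerA_chain ranks j (c - 1) (by omega)
        have h' : j + (c - 1) = j + c - 1 := by omega
        rwa [h'] at this
      -- c ≥ 13 since run starts ≤ 2 and ends ≥ 14
      have hcbig : 13 ≤ c := by
        have : (14 : Int) ≤ ranks.getD j 0 + (c - 1 : Nat) := by rw [← hend]; omega
        have hj2 : ranks.getD j 0 ≤ 2 := by omega
        have : (12 : Int) ≤ ((c - 1 : Nat) : Int) := by omega
        omega
      -- then the quadruple shifts one step right
      have hq' : QuadAt ranks (j + 1) := by
        have s2 := innerA_chain ranks j 2 (by omega)
        have s3 := innerA_chain ranks j 3 (by omega)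
        have s4 := innerA_chain ranks j 4 (by omega)
        have s1 := innerA_chain ranks j 1 (by omega)
        refine ⟨by omega, ?_, ?_, ?_⟩
        · have e : j + 1 + 1 = j + 2 := by omega
          rw [e, s2, s1]; push_cast; ring
        · have e1 : j + 1 + 2 = j + 3 := by omega
          have e2 : j + 1 + 1 = j + 2 := by omega
          rw [e1, e2, s3, s2]; push_cast; ring
        · have e1 : j + 1 + 3 = j + 4 := by omega
          have e2 : j + 1 + 2 = j + 3 := by omega
          rw [e1, e2, s4, s3]; push_cast; ring
      exact ih (ranks.length - (j + 1)) (by omega) (j + 1) rfl hq'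

theorem A_iff_quad (ranks : List Int) : has_open_ended_draw_py ranks = true ↔ HasQuad ranks := by
  rw [has_open_ended_draw_py, outerA_iff]
  constructor
  · rintro ⟨i, _, h2, h3, _⟩
    exact ⟨i, innerA_quad ranks i (by omega) h3⟩
  · rintro ⟨j, hq⟩
    obtain ⟨i, h0, h2, h3, h5⟩ := quad_to_outer ranks j hq
    exact ⟨i, h0, h2, h3, h5⟩

-- B-side loop invariant characterization
theorem bLoop_iff (ranks : List Int) : ∀ xs k run, xs = ranks.drop k → 1 ≤ k → 1 ≤ run → run ≤ 3 → run ≤ k →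
    (∀ s, 1 ≤ s → s < run → ranks.getD (k - s) 0 = ranks.getD (k - s - 1) 0 + 1) →
    (run < 3 → run = k ∨ ranks.getD (k - run) 0 ≠ ranks.getD (k - run - 1) 0 + 1) →
    (bLoop xs (ranks.getD (k - 1) 0) run = true ↔ ∃ j, QuadAt ranks j ∧ k ≤ j + 3) := by
  intro xs
  induction xs with
  | nil =>
    intro k run hxs _ _ _ _ _ _
    have hk : ranks.length ≤ k := by
      by_contra h
      have := List.drop_eq_nil_iff.mp hxs.symm
      omega
    constructor
    · intro h; exact absurd h (by simp [bLoop])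
    · rintro ⟨j, hq, _⟩
      have := hq.1
      omega
  | cons x xs ihx =>
    intro k run hxs hk1 hr1 hr3 hrk hist hmax
    have hkn : k < ranks.length := by
      by_contra h
      rw [List.drop_eq_nil_iff.mpr (by omega)] at hxs
      exact absurd hxs (by simp)
    have hcons : x :: xs = ranks.getD k 0 :: ranks.drop (k + 1) := by
      rw [hxs, List.drop_eq_getElem_cons hkn, List.getD_eq_getElem?_getD,
        List.getElem?_eq_getElem hkn]
      rfl
    have hx : x = ranks.getD k 0 := (List.cons_eq_cons.mp hcons).1
    have hxs' : xs = ranks.drop (k + 1) := (List.cons_eq_cons.mp hcons).2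
    by_cases hext : ranks.getD k 0 = ranks.getD (k - 1) 0 + 1
    · -- run extends
      by_cases hrun3 : run = 3
      · -- counter reaches 4: a quadruple ends at k
        have hquad : QuadAt ranks (k - 3) := by
          have hk3 : 3 ≤ k := by omega
          have g1 := hist 1 (by omega) (by omega)
          have g2 := hist 2 (by omega) (by omega)
          refine ⟨by omega, ?_, ?_, ?_⟩
          · rw [show k - 3 + 1 = k - 2 by omega, show k - 3 = k - 2 - 1 by omega]
            exact g2
          · rw [show k - 3 + 2 = k - 1 by omega, show k - 3 + 1 = k - 1 - 1 by omega]
            exact g1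
          · rw [show k - 3 + 3 = k by omega, show k - 3 + 2 = k - 1 by omega]
            exact hext
        have hc : x = ranks.getD (k - 1) 0 + 1 := by rw [hx]; exact hext
        have hbt : bLoop (x :: xs) (ranks.getD (k - 1) 0) run = true := by
          show (if 4 ≤ (if x = ranks.getD (k - 1) 0 + 1 then run + 1 else 1) then true
                else bLoop xs x (if x = ranks.getD (k - 1) 0 + 1 then run + 1 else 1)) = true
          simp only [if_pos hc]
          rw [if_pos (show 4 ≤ run + 1 by omega)]
        rw [hbt]
        simp only [true_iff]
        exact ⟨k - 3, hquad, by omega⟩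
      · -- counter becomes run + 1 ≤ 3, recurse
        have hc : x = ranks.getD (k - 1) 0 + 1 := by rw [hx]; exact hext
        have hstep : bLoop (x :: xs) (ranks.getD (k - 1) 0) run = bLoop xs x (run + 1) := by
          show (if 4 ≤ (if x = ranks.getD (k - 1) 0 + 1 then run + 1 else 1) then true
                else bLoop xs x (if x = ranks.getD (k - 1) 0 + 1 then run + 1 else 1)) = _
          simp only [if_pos hc]
          rw [if_neg (show ¬ 4 ≤ run + 1 by omega)]
        have hih := ihx (k + 1) (run + 1) hxs' (by omega) (by omega) (by omega) (by omega) ?_ ?_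
        · rw [Nat.add_sub_cancel] at hih
          rw [hstep, hx, hih]
          constructor
          · rintro ⟨j, hq, hj⟩; exact ⟨j, hq, by omega⟩
          · rintro ⟨j, hq, hj⟩
            refine ⟨j, hq, ?_⟩
            rcases Nat.lt_or_ge (j + 3) (k + 1) with h | h
            · -- the quadruple would end exactly at k: contradicts run's maximality
              exfalso
              have hjk : j + 3 = k := by omega
              obtain ⟨_, q1, q2, q3⟩ := hq
              rcases hmax (by omega) with hrk' | hne
              · omega
              · interval_cases run
                · apply hne
                  rw [show k - 1 - 1 = j + 1 by omega, show k - 1 = j + 2 by omega]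
                  exact q2
                · apply hne
                  rw [show k - 2 - 1 = j by omega, show k - 2 = j + 1 by omega]
                  exact q1
                · exact hrun3 rfl
            · omega
        · -- history for run + 1 at k + 1
          intro s hs1 hs2
          rcases Nat.eq_or_lt_of_le hs1 with h | h
          · rw [← h, show k + 1 - 1 - 1 = k - 1 by omega, show k + 1 - 1 = k by omega]
            exact hext
          · rw [show k + 1 - s - 1 = k - (s - 1) - 1 by omega,
              show k + 1 - s = k - (s - 1) by omega]
            exact hist (s - 1) (by omega) (by omega)
        · -- maximality for run + 1 at k + 1
          intro h3
          rcases hmax (by omega) with h | h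
          · left; omega
          · right
            rw [show k + 1 - (run + 1) - 1 = k - run - 1 by omega,
              show k + 1 - (run + 1) = k - run by omega]
            exact h
    · -- run resets to 1
      have hc : ¬ x = ranks.getD (k - 1) 0 + 1 := by rw [hx]; exact hext
      have hstep : bLoop (x :: xs) (ranks.getD (k - 1) 0) run = bLoop xs x 1 := by
        show (if 4 ≤ (if x = ranks.getD (k - 1) 0 + 1 then run + 1 else 1) then true
              else bLoop xs x (if x = ranks.getD (k - 1) 0 + 1 then run + 1 else 1)) = _
        simp only [if_neg hc]
        rw [if_neg (show ¬ (4:Nat) ≤ 1 by omega)]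
      have hih := ihx (k + 1) 1 hxs' (by omega) (by omega) (by omega) (by omega)
        (by omega) ?_
      · rw [Nat.add_sub_cancel] at hih
        rw [hstep, hx, hih]
        constructor
        · rintro ⟨j, hq, hj⟩; exact ⟨j, hq, by omega⟩
        · rintro ⟨j, hq, hj⟩
          refine ⟨j, hq, ?_⟩
          rcases Nat.lt_or_ge (j + 3) (k + 1) with h | h
          · exfalso
            apply hext
            obtain ⟨_, q1, q2, q3⟩ := hq
            rw [show k - 1 = j + 2 by omega, show k = j + 3 by omega]
            exact q3
          · omega
      · -- maximality for 1 at k + 1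
        intro _
        right
        rw [show k + 1 - 1 - 1 = k - 1 by omega, show k + 1 - 1 = k by omega]
        exact hext

theorem B_iff_quad (ranks : List Int) : has_open_ended_draw_py_alt ranks = true ↔ HasQuad ranks := by
  match ranks with
  | [] =>
    simp only [has_open_ended_draw_py_alt]
    constructor
    · intro h; exact absurd h (by simp)
    · rintro ⟨j, hq⟩; exact absurd hq.1 (by simp)
  | x :: xs =>
    have hx : x = (x :: xs).getD (1 - 1) 0 := by simp
    have hxs : xs = (x :: xs).drop 1 := by simp
    simp only [has_open_ended_draw_py_alt]
    rw [hx, bLoop_iff (x :: xs) xs 1 1 hxs (le_refl _) (le_refl _) (by omega) (le_refl _)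
      (by omega) (fun _ => Or.inl rfl)]
    constructor
    · rintro ⟨j, hq, _⟩; exact ⟨j, hq⟩
    · rintro ⟨j, hq⟩; exact ⟨j, hq, by omega⟩

-- ===== VERDICT (by name: the statement is the Claim_ definition above) =====
theorem has_open_ended_draw_py_spec : Claim_equal_has_open_ended_draw_py := by
  intro ranks _
  unfold Spec_has_open_ended_draw_py
  have hA := A_iff_quad ranks
  have hB := B_iff_quad ranks
  cases hA' : has_open_ended_draw_py ranks <;> cases hB' : has_open_ended_draw_py_alt ranks <;>
    simp_all
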